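-- pv_equiv track=rewrite | github.com/hacetheworld/competitive-programming-practices | contests/codeforce/div-3/Codeforces Round #693/D.py | Solution
-- ===== SOURCE A (Python) =====
-- def Solution(arr, n):
--     evenArr = []
--     oddArr = []
--     for v in arr:
--         if v & 1:
--             oddArr.append(v)
--         else:
--             evenArr.append(v)
--
--     turn = 0
--     aliceScore = 0
--     bobScore = 0
--     i, j = 0, 0
--     evenArr = sorted(evenArr, reverse=True)
--     oddArr = sorted(oddArr, reverse=True)
--     while i < len(evenArr) and j < len(oddArr):
--         itm = 0
--         if evenArr[i] < oddArr[j]: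
--             itm = oddArr[j]
--             j += 1
--         else:
--             itm = evenArr[i]
--             i += 1
--         if turn == 0:
--             if itm & 1 == 0:
--                 aliceScore += itm
--             turn = 1
--         else:
--             if itm & 1:
--                 bobScore += itm
--             turn = 0
--     while i < len(evenArr):
--         itm = 0
--         itm = evenArr[i]
--         i += 1
--         if turn == 0:
--             if itm & 1 == 0:
--                 aliceScore += itm
--             turn = 1
--         else:
--             if itm & 1:
--                 bobScore += itm
--             turn = 0
--     while j < len(oddArr):
--         itm = 0
--         itm = oddArr[j]
--         j += 1
--         if turn == 0:
--             if itm & 1 == 0: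
--                 aliceScore += itm
--             turn = 1
--         else:
--             if itm & 1:
--                 bobScore += itm
--             turn = 0
--
--     if aliceScore > bobScore:
--         return "Alice"
--     elif bobScore > aliceScore:
--         return "Bob"
--     else:
--         return "Tie"
-- ===== SOURCE B (Python) =====
-- def Solution(arr, n):
--     aliceScore = 0
--     bobScore = 0
--     turn = 0
--     for v in sorted(arr, reverse=True):
--         if turn == 0:
--             if v % 2 == 0:
--                 aliceScore += v
--         else:
--             if v % 2 == 1:
--                 bobScore += v
--         turn ^= 1
--     if aliceScore > bobScore:
--         return "Alice"
--     elif bobScore > aliceScore: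
--         return "Bob"
--     else:
--         return "Tie"
-- ===== Notes on version B (the rewrite author's own statement) =====
-- stated objective: simpler
-- what changed: B sorts the whole array once in descending order and scores it in a single alternating pass, replacing A's even/odd partition, two separate sorts and hand-written two-pointer merge across three while loops.
import Mathlib
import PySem

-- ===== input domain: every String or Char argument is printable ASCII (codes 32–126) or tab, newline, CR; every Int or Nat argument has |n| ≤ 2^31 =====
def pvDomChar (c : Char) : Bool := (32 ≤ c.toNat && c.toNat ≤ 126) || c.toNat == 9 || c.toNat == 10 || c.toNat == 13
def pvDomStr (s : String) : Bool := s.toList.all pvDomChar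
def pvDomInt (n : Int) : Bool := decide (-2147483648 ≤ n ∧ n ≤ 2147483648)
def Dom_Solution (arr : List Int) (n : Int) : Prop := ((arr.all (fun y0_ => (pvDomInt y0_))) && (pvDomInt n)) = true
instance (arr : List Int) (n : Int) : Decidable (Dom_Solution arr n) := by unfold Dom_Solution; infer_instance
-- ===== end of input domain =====

-- B sorts the whole array once descending and scores it in one alternating pass (simpler than A's partition + two sorts + three merge loops); n is unused by both.


-- ===== PORT A =====
-- the repeated turn/score block of A's three while-loops (identical in all three)
def stepA (t a b itm : Int) : Int × Int × Int :=
  if t = 0 then (1, (if PySem.Int.band itm 1 = 0 then a + itm else a), b)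
  else (0, a, (if PySem.Int.band itm 1 ≠ 0 then b + itm else b))

-- the three while-loops of A: two-pointer merge of the even and odd lists, then the leftovers
def loopA : List Int → List Int → Int → Int → Int → Int × Int
  | [], [], _, a, b => (a, b)
  | [], o :: os, t, a, b =>
      let s := stepA t a b o; loopA [] os s.1 s.2.1 s.2.2
  | e :: es, [], t, a, b =>
      let s := stepA t a b e; loopA es [] s.1 s.2.1 s.2.2
  | e :: es, o :: os, t, a, b =>
      if e < o then
        let s := stepA t a b o; loopA (e :: es) os s.1 s.2.1 s.2.2
      else
        let s := stepA t a b e; loopA es (o :: os) s.1 s.2.1 s.2.2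
  termination_by es os _ _ _ => es.length + os.length

def Solution (arr : List Int) (_n : Int) : String :=
  let part := arr.foldl
    (fun (p : List Int × List Int) v =>
      if PySem.Int.band v 1 ≠ 0 then (p.1, p.2 ++ [v]) else (p.1 ++ [v], p.2))
    ([], [])
  let evenArr := PySem.List.sorted part.1 (fun x => x) true
  let oddArr := PySem.List.sorted part.2 (fun x => x) true
  let r := loopA evenArr oddArr 0 0 0
  if r.1 > r.2 then "Alice" else if r.2 > r.1 then "Bob" else "Tie"

-- ===== PORT B =====
def stepB (s : Int × Int × Int) (v : Int) : Int × Int × Int :=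
  if s.1 = 0 then (1, (if PySem.Int.mod v 2 = 0 then s.2.1 + v else s.2.1), s.2.2)
  else (0, s.2.1, (if PySem.Int.mod v 2 = 1 then s.2.2 + v else s.2.2))

def Solution_alt (arr : List Int) (_n : Int) : String :=
  let r := (PySem.List.sorted arr (fun x => x) true).foldl stepB (0, 0, 0)
  if r.2.1 > r.2.2 then "Alice" else if r.2.2 > r.2.1 then "Bob" else "Tie"

-- ===== PRECONDITION & SPEC =====
def Spec_Solution (arr : List Int) (n : Int) (out : String) : Prop := out = Solution_alt arr n
instance (arr : List Int) (n : Int) (out : String) : Decidable (Spec_Solution arr n out) := by unfold Spec_Solution; infer_instance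

-- ===== CLAIM (what is proved, stated in full; the proofs are below) =====
def Claim_equal_Solution : Prop := ∀ (arr : List Int) (n : Int), Dom_Solution arr n → Spec_Solution arr n (Solution arr n)

-- ===== LEMMAS AND PROOFS =====

-- the merge order A's two-pointer loop walks through
def mergeL : List Int → List Int → List Int
  | [], os => os
  | e :: es, [] => e :: es
  | e :: es, o :: os => if e < o then o :: mergeL (e :: es) os else e :: mergeL es (o :: os)
  termination_by es os => es.length + os.length

theorem mergeL_nil (es : List Int) : mergeL es [] = es := by
  cases es <;> simp [mergeL]

theorem stepA_eq_stepB (t a b v : Int) : stepA t a b v = stepB (t, a, b) v := by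
  unfold stepA stepB
  have h : PySem.Int.band v 1 = PySem.Int.mod v 2 := PySem.Int.band_one v
  have h2 : (0:Int) < 2 := by omega
  have hb := PySem.Int.mod_nonneg v h2
  have hl := PySem.Int.mod_lt v h2
  simp only [h]
  split_ifs <;> simp_all <;> omega

theorem loopA_eq_foldl (es os : List Int) (t a b : Int) :
    loopA es os t a b = ((mergeL es os).foldl stepB (t, a, b)).2 := by
  fun_induction loopA es os t a b with
  | case1 => simp [mergeL]
  | case2 o os t a b s ih =>
      simp only [mergeL, List.foldl_cons, ← stepA_eq_stepB]
      simpa [mergeL] using ih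
  | case3 e es t a b s ih =>
      simp only [mergeL_nil, List.foldl_cons, ← stepA_eq_stepB]
      simpa [mergeL_nil] using ih
  | case4 e es o os t a b hlt s ih =>
      simp only [mergeL, if_pos hlt, List.foldl_cons, ← stepA_eq_stepB]
      simpa using ih
  | case5 e es o os t a b hlt s ih =>
      simp only [mergeL, if_neg hlt, List.foldl_cons, ← stepA_eq_stepB]
      simpa using ih

theorem mergeL_perm (es os : List Int) : (mergeL es os).Perm (es ++ os) := by
  fun_induction mergeL es os with
  | case1 os => simp
  | case2 e es => simp
  | case3 e es o os hlt ih =>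
      exact (ih.cons o).trans List.perm_middle.symm
  | case4 e es o os hlt ih =>
      exact ih.cons e

theorem mem_mergeL (x : Int) (es os : List Int) : x ∈ mergeL es os ↔ x ∈ es ∨ x ∈ os := by
  rw [(mergeL_perm es os).mem_iff]; simp

theorem mergeL_pairwise (es os : List Int)
    (he : es.Pairwise (fun a b => b ≤ a)) (ho : os.Pairwise (fun a b => b ≤ a)) :
    (mergeL es os).Pairwise (fun a b => b ≤ a) := by
  fun_induction mergeL es os with
  | case1 os => exact ho
  | case2 e es => exact he
  | case3 e es o os hlt ih =>
      rw [List.pairwise_cons] at ho ⊢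
      refine ⟨fun y hy => ?_, ih he ho.2⟩
      rcases (mem_mergeL y (e :: es) os).1 hy with h | h
      · rcases List.mem_cons.1 h with rfl | h
        · omega
        · have := (List.pairwise_cons.1 he).1 y h; omega
      · exact ho.1 y h
  | case4 e es o os hlt ih =>
      rw [List.pairwise_cons] at he ⊢
      refine ⟨fun y hy => ?_, ih he.2 ho⟩
      rcases (mem_mergeL y es (o :: os)).1 hy with h | h
      · exact he.1 y h
      · rcases List.mem_cons.1 h with rfl | h
        · omega
        · have := (List.pairwise_cons.1 ho).1 y h; omega

-- A's partition fold appends the even-bit and odd-bit filters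
theorem part_eq_filter (arr : List Int) (e o : List Int) :
    arr.foldl
      (fun (p : List Int × List Int) v =>
        if PySem.Int.band v 1 ≠ 0 then (p.1, p.2 ++ [v]) else (p.1 ++ [v], p.2))
      (e, o)
    = (e ++ arr.filter (fun v => decide (PySem.Int.band v 1 = 0)),
       o ++ arr.filter (fun v => !decide (PySem.Int.band v 1 = 0))) := by
  induction arr generalizing e o with
  | nil => simp
  | cons v vs ih =>
      by_cases h : PySem.Int.band v 1 = 0
      · have hstep : (if PySem.Int.band v 1 ≠ 0 then ((e, o).1, (e, o).2 ++ [v])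
            else ((e, o).1 ++ [v], (e, o).2)) = (e ++ [v], o) := by simp [h]
        rw [List.foldl_cons, hstep, ih]
        simp [h]
      · have hstep : (if PySem.Int.band v 1 ≠ 0 then ((e, o).1, (e, o).2 ++ [v])
            else ((e, o).1 ++ [v], (e, o).2)) = (e, o ++ [v]) := by simp [h]
        rw [List.foldl_cons, hstep, ih]
        simp [h]

-- the merged sequence is exactly the whole array sorted descending
theorem mergeL_eq_sorted (arr : List Int) :
    mergeL
      (PySem.List.sorted (arr.filter (fun v => decide (PySem.Int.band v 1 = 0))) (fun x => x) true)
      (PySem.List.sorted (arr.filter (fun v => !decide (PySem.Int.band v 1 = 0))) (fun x => x) true)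
    = PySem.List.sorted arr (fun x => x) true := by
  apply List.Perm.eq_of_pairwise (le := fun a b : Int => b ≤ a)
  · exact fun a b _ _ h1 h2 => le_antisymm h2 h1
  · exact mergeL_pairwise _ _
      (PySem.List.sorted_pairwise_rev _ _) (PySem.List.sorted_pairwise_rev _ _)
  · exact PySem.List.sorted_pairwise_rev _ _
  · refine ((mergeL_perm _ _).trans ?_).trans (PySem.List.sorted_perm arr (fun x => x) true).symm
    refine ((PySem.List.sorted_perm _ _ _).append (PySem.List.sorted_perm _ _ _)).trans ?_
    exact List.filter_append_perm _ arr

-- ===== VERDICT (by name: the statement is the Claim_ definition above) =====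
theorem Solution_spec : Claim_equal_Solution := by
  intro arr n _
  unfold Spec_Solution Solution Solution_alt
  simp only [part_eq_filter, List.nil_append, loopA_eq_foldl, mergeL_eq_sorted]
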